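-- pv_equiv track=rewrite | github.com/DimitarRDimitrov/Programming101 | Week0/nan_expand.py | nan_expand
-- ===== SOURCE A (Python) =====
-- def nan_expand(n):
--     i = 0
--     result = ""
--     if n == 0:
--         return ""
--     while i <= n:
--         if i < n:
--             result += "Not a "
--         else:
--             result += "NaN"
--         i += 1
--     return result
-- ===== SOURCE B (Python) =====
-- # Closed form: no loop, no counter; "" for n <= 0 (A's while never runs there).
-- def nan_expand(n):
--     return "Not a " * n + "NaN" if n > 0 else ""
-- ===== Notes on version B (the rewrite author's own statement) =====
-- stated objective: simpler
-- what changed: Replaced the counter-driven while loop that appends piece by piece with a single closed-form expression: string repetition of the prefix plus the suffix for positive n, and the empty string otherwise (where A's loop never runs).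
import Mathlib
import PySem

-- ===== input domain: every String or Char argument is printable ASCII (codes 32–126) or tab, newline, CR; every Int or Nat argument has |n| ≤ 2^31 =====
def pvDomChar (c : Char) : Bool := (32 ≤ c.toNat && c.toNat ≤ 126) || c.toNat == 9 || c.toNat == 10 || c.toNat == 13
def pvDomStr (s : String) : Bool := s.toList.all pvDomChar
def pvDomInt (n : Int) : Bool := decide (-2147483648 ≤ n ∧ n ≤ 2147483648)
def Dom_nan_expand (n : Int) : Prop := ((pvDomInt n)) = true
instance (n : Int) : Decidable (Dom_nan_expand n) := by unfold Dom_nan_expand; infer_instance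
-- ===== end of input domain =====

-- B replaces A's counter loop with one closed-form expression ("Not a " * n + "NaN" for n > 0, else ""); objective: simpler.

-- ===== PORT A =====
-- the while loop of A: state is the counter i and the accumulated result string
def nanLoop (n i : Int) (result : String) : String :=
  if i ≤ n then
    if i < n then nanLoop n (i + 1) (result ++ "Not a ")
    else nanLoop n (i + 1) (result ++ "NaN")
  else result
termination_by (n + 1 - i).toNat
decreasing_by all_goals omega

def nan_expand (n : Int) : String :=
  if n = 0 then "" else nanLoop n 0 ""

-- ===== PORT B =====
def nan_expand_alt (n : Int) : String :=
  if 0 < n then String.ofList (PySem.List.pyRepeat "Not a ".toList n) ++ "NaN" else ""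

-- ===== PRECONDITION & SPEC =====
def Spec_nan_expand (n : Int) (out : String) : Prop := out = nan_expand_alt n
instance (n : Int) (out : String) : Decidable (Spec_nan_expand n out) := by unfold Spec_nan_expand; infer_instance

-- ===== CLAIM (what is proved, stated in full; the proofs are below) =====
def Claim_equal_nan_expand : Prop := ∀ (n : Int), Dom_nan_expand n → Spec_nan_expand n (nan_expand n)

-- ===== LEMMAS AND PROOFS =====

-- loop invariant: from counter i ≤ n, the loop appends (n - i) copies of "Not a " and one "NaN"
theorem nanLoop_eq (k : Nat) (n i : Int) (r : String) (h : i ≤ n) (hk : (n - i).toNat = k) :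
    nanLoop n i r = r ++ String.ofList (PySem.List.pyRepeat "Not a ".toList (n - i)) ++ "NaN" := by
  induction k generalizing i r with
  | zero =>
    have hni : i = n := by omega
    subst hni
    rw [nanLoop, if_pos le_rfl, if_neg (lt_irrefl i), nanLoop, if_neg (by omega)]
    simp [PySem.List.pyRepeat]
  | succ m ih =>
    have hlt : i < n := by omega
    rw [nanLoop, if_pos h, if_pos hlt, ih (i + 1) _ (by omega) (by omega)]
    have : PySem.List.pyRepeat "Not a ".toList (n - i)
        = "Not a ".toList ++ PySem.List.pyRepeat "Not a ".toList (n - (i + 1)) := by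
      simp only [PySem.List.pyRepeat]
      have h1 : (n - i).toNat = (n - (i + 1)).toNat + 1 := by omega
      rw [h1, List.replicate_succ, List.flatten_cons]
    rw [this, String.ofList_append, String.ofList_toList]
    simp [String.append_assoc]

-- ===== VERDICT (by name: the statement is the Claim_ definition above) =====
theorem nan_expand_spec : Claim_equal_nan_expand := by
  intro n _
  unfold Spec_nan_expand nan_expand nan_expand_alt
  by_cases h0 : n = 0
  · simp [h0]
  · rw [if_neg h0]
    by_cases hp : 0 < n
    · rw [if_pos hp, nanLoop_eq (n - 0).toNat n 0 "" (by omega) rfl]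
      simp
    · rw [if_neg hp, nanLoop, if_neg (by omega)]
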